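-- pv_equiv track=rewrite | github.com/seanwevans/RandomPython | words2.py | constantWidthQ
-- ===== SOURCE A (Python) =====
-- def constantWidthQ(word):
-- 	for i in range(len(word)-2):
-- 		a = ord(word[i])
-- 		b = ord(word[i+1])
-- 		c = ord(word[i+2])
-- 		if abs(b-a) != abs(c-b):
-- 			return(False)
-- 	return(True)
-- ===== SOURCE B (Python) =====
-- def constantWidthQ(word):
--     return len({abs(ord(y) - ord(x)) for x, y in zip(word, word[1:])}) <= 1
-- ===== Notes on version B (the rewrite author's own statement) =====
-- stated objective: simpler
-- what changed: B collects the absolute adjacent char-code differences into a set and tests that at most one distinct difference exists, replacing A's index-driven sliding-triple loop with early return by a dedup-set cardinality test.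
import Mathlib
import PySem

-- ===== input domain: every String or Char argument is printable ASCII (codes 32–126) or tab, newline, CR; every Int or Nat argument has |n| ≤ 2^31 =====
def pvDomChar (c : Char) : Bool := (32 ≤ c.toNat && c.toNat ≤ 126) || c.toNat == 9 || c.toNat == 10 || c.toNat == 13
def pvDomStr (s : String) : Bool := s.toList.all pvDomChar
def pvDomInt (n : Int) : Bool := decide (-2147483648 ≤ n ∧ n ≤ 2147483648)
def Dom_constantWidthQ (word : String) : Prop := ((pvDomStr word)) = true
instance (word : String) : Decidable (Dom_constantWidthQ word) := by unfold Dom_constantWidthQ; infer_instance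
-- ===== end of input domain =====

-- B replaces A's index-driven sliding-triple loop (early return on the first mismatch) by
-- collecting the absolute adjacent char-code differences into a set and testing that at
-- most one distinct difference exists (simpler, set-based formulation).

-- ===== PORT A =====
-- the for-loop over range(len(word)-2) with early `return False`; indexing via pyGet?
-- (the `none` branches are unreachable: every i in range(len-2) has i, i+1, i+2 in range)
def pvLoopA (cs : List Char) : List Int → Bool
  | [] => true
  | i :: rest =>
    match PySem.List.pyGet? cs i, PySem.List.pyGet? cs (i + 1), PySem.List.pyGet? cs (i + 2) with
    | some a, some b, some c =>
      if |((b.toNat : Int)) - (a.toNat : Int)| ≠ |((c.toNat : Int)) - (b.toNat : Int)| then false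
      else pvLoopA cs rest
    | _, _, _ => false

def constantWidthQ (word : String) : Bool :=
  pvLoopA word.toList (PySem.List.pyRange 0 ((word.toList.length : Int) - 2) 1)

-- ===== PORT B =====
def constantWidthQ_alt (word : String) : Bool :=
  let cs := word.toList
  let diffs : PySem.Set Int :=
    PySem.Set.ofList ((cs.zip cs.tail).map (fun p => |((p.2.toNat : Int)) - (p.1.toNat : Int)|))
  decide (diffs.length ≤ 1)

-- ===== PRECONDITION & SPEC =====
def Spec_constantWidthQ (word : String) (out : Bool) : Prop := out = constantWidthQ_alt word
instance (word : String) (out : Bool) : Decidable (Spec_constantWidthQ word out) := by unfold Spec_constantWidthQ; infer_instance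

-- ===== CLAIM (what is proved, stated in full; the proofs are below) =====
def Claim_equal_constantWidthQ : Prop := ∀ (word : String), Dom_constantWidthQ word → Spec_constantWidthQ word (constantWidthQ word)

-- ===== LEMMAS AND PROOFS =====

-- clean structural recursion equivalent to A's indexed loop
def pvChk : List Char → Bool
  | a :: b :: c :: r =>
    if |((b.toNat : Int)) - (a.toNat : Int)| ≠ |((c.toNat : Int)) - (b.toNat : Int)| then false
    else pvChk (b :: c :: r)
  | _ => true

lemma pvChk_short (cs : List Char) (h : cs.length ≤ 2) : pvChk cs = true := by
  match cs with
  | [] => rfl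
  | [_] => rfl
  | [_, _] => rfl
  | _ :: _ :: _ :: _ => simp at h

lemma pvLoopA_eq_chk (cs : List Char) (k : Nat) :
    pvLoopA cs (PySem.List.pyRange (k : Int) ((cs.length : Int) - 2) 1) = pvChk (cs.drop k) := by
  by_cases hk : (k : Int) < (cs.length : Int) - 2
  · have hk3 : k + 2 < cs.length := by omega
    rw [PySem.List.pyRange_one_cons (by omega)]
    have e0 : PySem.List.pyGet? cs (k : Int) = some cs[k] :=
      PySem.List.pyGet?_ofNat cs k (by omega)
    have e1 : PySem.List.pyGet? cs ((k : Int) + 1) = some cs[k + 1] := by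
      have := PySem.List.pyGet?_ofNat cs (k+1) (by omega)
      simpa [Nat.cast_add] using this
    have e2 : PySem.List.pyGet? cs ((k : Int) + 2) = some cs[k + 2] := by
      have := PySem.List.pyGet?_ofNat cs (k+2) (by omega)
      simpa [Nat.cast_add] using this
    have hd : cs.drop k = cs[k] :: cs[k + 1] :: cs[k + 2] :: cs.drop (k + 3) := by
      rw [List.drop_eq_getElem_cons (by omega), List.drop_eq_getElem_cons (by omega),
        List.drop_eq_getElem_cons (by omega)]
    have ih := pvLoopA_eq_chk cs (k + 1)
    rw [hd]
    show (match PySem.List.pyGet? cs (k : Int), PySem.List.pyGet? cs ((k : Int) + 1),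
        PySem.List.pyGet? cs ((k : Int) + 2) with
      | some a, some b, some c =>
        if |((b.toNat : Int)) - (a.toNat : Int)| ≠ |((c.toNat : Int)) - (b.toNat : Int)| then false
        else pvLoopA cs (PySem.List.pyRange ((k : Int) + 1) ((cs.length : Int) - 2) 1)
      | _, _, _ => false) = _
    rw [e0, e1, e2]
    simp only [pvChk]
    split_ifs with h
    · rfl
    · have : ((k : Int) + 1) = ((k + 1 : Nat) : Int) := by push_cast; ring
      rw [this, ih]
      rw [List.drop_eq_getElem_cons (l := cs) (i := k + 1) (by omega),
        List.drop_eq_getElem_cons (by omega)]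
  · have : PySem.List.pyRange (k : Int) ((cs.length : Int) - 2) 1 = [] := by
      simp [PySem.List.pyRange_one]
      omega
    rw [this]
    have : (cs.drop k).length ≤ 2 := by simp; omega
    exact (pvChk_short _ this).symm
termination_by cs.length - k

-- the set of a list has at most one element iff all its elements are equal
lemma pv_ofList_le_one_iff (l : List Int) :
    (PySem.Set.ofList l).length ≤ 1 ↔ ∀ x ∈ l, ∀ y ∈ l, x = y := by
  constructor
  · intro h x hx y hy
    have hx' : x ∈ PySem.Set.ofList l := by simpa [PySem.Set.mem_ofList] using hx
    have hy' : y ∈ PySem.Set.ofList l := by simpa [PySem.Set.mem_ofList] using hy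
    match hs : PySem.Set.ofList l with
    | [] => rw [hs] at hx'; simp at hx'
    | [z] =>
      rw [hs] at hx' hy'; simp at hx' hy'; rw [hx', hy']
    | a :: b :: r => rw [hs] at h; simp at h
  · intro h
    match l with
    | [] => simp [PySem.Set.ofList_nil]
    | z :: r =>
      have : PySem.Set.ofList (z :: r) = [z] := by
        rw [PySem.Set.ofList_cons]
        have : PySem.Set.discard (PySem.Set.ofList r) z = [] := by
          apply List.eq_nil_iff_forall_not_mem.mpr
          intro y hy
          have hy' : y ∈ PySem.Set.ofList r ∧ y ≠ z := by
            simpa [PySem.Set.mem_discard] using hy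
          have hyr : y ∈ r := by simpa [PySem.Set.mem_ofList] using hy'.1
          exact hy'.2 (h y (by simp [hyr]) z (by simp))
        rw [this]
      simp [this]

-- all adjacent diffs pairwise equal iff the triple check passes
lemma pvChk_iff (cs : List Char) :
    pvChk cs = true ↔ ∀ x ∈ (cs.zip cs.tail).map (fun p => |((p.2.toNat : Int)) - (p.1.toNat : Int)|),
      ∀ y ∈ (cs.zip cs.tail).map (fun p => |((p.2.toNat : Int)) - (p.1.toNat : Int)|), x = y := by
  match cs with
  | [] => simp [pvChk]
  | [_] => simp [pvChk]
  | [a, b] => simp [pvChk]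
  | a :: b :: c :: r =>
    have ih := pvChk_iff (b :: c :: r)
    simp only [pvChk, List.tail, List.zip, List.zipWith, List.map] at ih ⊢
    split_ifs with h
    · constructor
      · intro hf; simp at hf
      · intro hall
        exact absurd (hall _ (by simp) _ (by simp [List.mem_cons])) h
    · push_neg at h
      rw [ih]
      constructor
      · intro hall x hx y hy
        -- every diff in the longer list equals |b-a| = |c-b|, which heads the shorter list
        have key : ∀ z, z ∈ (|((b.toNat : Int)) - (a.toNat : Int)| ::
            |((c.toNat : Int)) - (b.toNat : Int)| ::
              ((c :: r).zip r).map (fun p => |((p.2.toNat : Int)) - (p.1.toNat : Int)|)) →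
            z = |((c.toNat : Int)) - (b.toNat : Int)| := by
          intro z hz
          rcases List.mem_cons.mp hz with h1 | h2
          · rw [h1, h]
          · exact hall z h2 _ (by simp)
        have hx' := key x hx
        have hy' := key y hy
        rw [hx', hy']
      · intro hall x hx y hy
        exact hall x (List.mem_cons.mpr (Or.inr hx)) y (List.mem_cons.mpr (Or.inr hy))

theorem pv_main (word : String) : constantWidthQ word = constantWidthQ_alt word := by
  unfold constantWidthQ constantWidthQ_alt
  have h0 := pvLoopA_eq_chk word.toList 0
  simp only [Nat.cast_zero] at h0
  rw [h0, List.drop_zero]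
  cases hb : pvChk word.toList with
  | false =>
    have : ¬ ((PySem.Set.ofList ((word.toList.zip word.toList.tail).map
        (fun p => |((p.2.toNat : Int)) - (p.1.toNat : Int)|))).length ≤ 1) := by
      intro hle
      have := (pvChk_iff word.toList).mpr ((pv_ofList_le_one_iff _).mp hle)
      rw [this] at hb; simp at hb
    simp [this]
  | true =>
    have := (pv_ofList_le_one_iff _).mpr ((pvChk_iff word.toList).mp hb)
    simp [this]

-- ===== VERDICT (by name: the statement is the Claim_ definition above) =====
theorem constantWidthQ_spec : Claim_equal_constantWidthQ := by
  intro word _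
  exact pv_main word
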